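-- pv_equiv track=rewrite | github.com/Nux-xader/sharpen_logic | python/data_structured_1.py | penghuni_rumah
-- ===== SOURCE A (Python) =====
-- def penghuni_rumah(data, num):
-- 	result = "tidak tahu"
-- 	for x in data:
-- 		try:
-- 			result = f"Nama keluarga penghuni rumah : {x[num]}"
-- 		except:
-- 			pass
--
-- 	return result
-- ===== SOURCE B (Python) =====
-- def penghuni_rumah(data, num):
--     for x in reversed(list(data)):
--         try:
--             return f"Nama keluarga penghuni rumah : {x[num]}"
--         except:
--             pass
--     return "tidak tahu"
-- ===== Notes on version B (the rewrite author's own statement) =====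
-- stated objective: simpler
-- what changed: Replaces A's full forward pass that keeps overwriting result with a backward scan that returns the first (i.e. last) accessible x[num] immediately, defaulting to 'tidak tahu' only after the loop.
import Mathlib
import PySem

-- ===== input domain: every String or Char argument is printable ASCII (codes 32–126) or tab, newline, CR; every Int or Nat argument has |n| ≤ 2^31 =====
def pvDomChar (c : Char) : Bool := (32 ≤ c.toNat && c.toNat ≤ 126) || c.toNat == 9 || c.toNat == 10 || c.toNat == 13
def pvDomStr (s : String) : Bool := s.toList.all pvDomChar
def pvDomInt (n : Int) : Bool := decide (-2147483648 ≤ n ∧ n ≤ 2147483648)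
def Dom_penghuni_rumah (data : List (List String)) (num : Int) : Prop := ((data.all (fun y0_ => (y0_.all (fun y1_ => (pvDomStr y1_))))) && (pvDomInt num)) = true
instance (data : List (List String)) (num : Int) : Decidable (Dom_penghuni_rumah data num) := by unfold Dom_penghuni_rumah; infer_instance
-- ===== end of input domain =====

-- B scans the materialized list in reverse and returns at the first accessible x[num]; A's forward overwrite loop is replaced by this early-exit backward search (simpler decomposition; return value only).

-- ===== PORT A =====
-- forward loop, overwriting result; except: pass keeps the old result
def penghuni_rumah (data : List (List String)) (num : Int) : String :=
  data.foldl
    (fun result x =>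
      match PySem.List.pyGet? x num with
      | some v => "Nama keluarga penghuni rumah : " ++ v
      | none => result)
    "tidak tahu"

-- ===== PORT B =====
-- backward scan with early return; default only after the loop
def pvB_scan (num : Int) : List (List String) → String
  | [] => "tidak tahu"
  | x :: rest =>
    match PySem.List.pyGet? x num with
    | some v => "Nama keluarga penghuni rumah : " ++ v
    | none => pvB_scan num rest

def penghuni_rumah_alt (data : List (List String)) (num : Int) : String :=
  pvB_scan num data.reverse

-- ===== PRECONDITION & SPEC =====
def Spec_penghuni_rumah (data : List (List String)) (num : Int) (out : String) : Prop := out = penghuni_rumah_alt data num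
instance (data : List (List String)) (num : Int) (out : String) : Decidable (Spec_penghuni_rumah data num out) := by unfold Spec_penghuni_rumah; infer_instance

-- ===== CLAIM (what is proved, stated in full; the proofs are below) =====
def Claim_equal_penghuni_rumah : Prop := ∀ (data : List (List String)) (num : Int), Dom_penghuni_rumah data num → Spec_penghuni_rumah data num (penghuni_rumah data num)

-- ===== LEMMAS AND PROOFS =====
-- early-exit backward scan with an arbitrary default r
def pvAux (num : Int) (r : String) : List (List String) → String
  | [] => r
  | x :: rest =>
    match PySem.List.pyGet? x num with
    | some v => "Nama keluarga penghuni rumah : " ++ v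
    | none => pvAux num r rest

theorem pvAux_append (num : Int) (r : String) (l m : List (List String)) :
    pvAux num r (l ++ m) = pvAux num (pvAux num r m) l := by
  induction l with
  | nil => rfl
  | cons x t ih =>
    simp only [List.cons_append, pvAux, ih]

theorem pvAux_eq_scan (num : Int) (l : List (List String)) :
    pvAux num "tidak tahu" l = pvB_scan num l := by
  induction l with
  | nil => rfl
  | cons x t ih => simp only [pvAux, pvB_scan, ih]

theorem foldl_eq_aux (num : Int) (data : List (List String)) (r : String) :
    data.foldl
      (fun result x =>
        match PySem.List.pyGet? x num with
        | some v => "Nama keluarga penghuni rumah : " ++ v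
        | none => result)
      r = pvAux num r data.reverse := by
  induction data generalizing r with
  | nil => rfl
  | cons x t ih =>
    simp only [List.foldl_cons, List.reverse_cons, pvAux_append, ih]
    rfl

-- ===== VERDICT (by name: the statement is the Claim_ definition above) =====
theorem penghuni_rumah_spec : Claim_equal_penghuni_rumah := by
  intro data num _
  show penghuni_rumah data num = penghuni_rumah_alt data num
  simp only [penghuni_rumah, penghuni_rumah_alt, foldl_eq_aux, pvAux_eq_scan]
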